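-- pv_equiv track=rewrite | github.com/TESSkyblivion/skyblivion-niflib | gen/nifxml.py | define_name
-- ===== SOURCE A (Python) =====
-- def define_name(n):
--     """
--     Formats an all-uppercase version of the name for use in C++ defines.
--     @param n: The class name to format in define style.
--     @type n: string
--     @return The resulting valid C++ define name
--     @rtype: string
--     """
--     n2 = ''
--     for i, c in enumerate(n):
--         if ('A' <= c) and (c <= 'Z'):
--             if i > 0:
--                 n2 += '_'
--                 n2 += c
--             else:
--                 n2 += c
--         elif (('a' <= c) and (c <= 'z')) or (('0' <= c) and (c <= '9')):
--             n2 += c.upper()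
--         else:
--             n2 += '_'
--     return n2
-- ===== SOURCE B (Python) =====
-- def define_name(n):
--     # pass 1: every character outside [A-Za-z0-9] becomes '_'
--     s = ['_' if not ('A' <= c <= 'Z' or 'a' <= c <= 'z' or '0' <= c <= '9') else c
--          for c in n]
--     # pass 2: put an '_' before every uppercase letter that is not first
--     s = ['_' + c if i > 0 and 'A' <= c <= 'Z' else c for i, c in enumerate(s)]
--     # pass 3: uppercase the whole string at once
--     return ''.join(s).upper()
-- ===== Notes on version B (the rewrite author's own statement) =====
-- stated objective: idiomatic
-- what changed: Replaces the single indexed loop with per-character three-way string concatenation by three whole-string passes: a comprehension mapping non-alphanumerics to '_', a comprehension inserting '_' before non-initial uppercase letters, then one join plus a single final .upper().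
import Mathlib
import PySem

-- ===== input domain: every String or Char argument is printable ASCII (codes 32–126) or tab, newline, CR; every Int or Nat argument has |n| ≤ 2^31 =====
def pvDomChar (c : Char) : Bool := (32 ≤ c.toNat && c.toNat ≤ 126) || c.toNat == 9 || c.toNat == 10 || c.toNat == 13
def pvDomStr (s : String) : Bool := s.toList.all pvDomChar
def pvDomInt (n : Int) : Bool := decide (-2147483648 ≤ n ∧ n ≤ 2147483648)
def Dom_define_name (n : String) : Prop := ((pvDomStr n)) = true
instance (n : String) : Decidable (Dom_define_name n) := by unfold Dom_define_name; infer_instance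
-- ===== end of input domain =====

-- B rewrites A's single indexed loop as three whole-string passes (normalize, insert underscores, one final upper); objective: idiomatic.

-- ===== PORT A =====
-- literal port of A: one fold over the enumerated characters building the output left to right
def define_name (n : String) : String :=
  String.ofList ((PySem.List.enumerate n.toList).foldl (fun n2 ic =>
    if 'A' ≤ ic.2 ∧ ic.2 ≤ 'Z' then
      if ic.1 > 0 then (n2 ++ ['_']) ++ [ic.2] else n2 ++ [ic.2]
    else if ('a' ≤ ic.2 ∧ ic.2 ≤ 'z') ∨ ('0' ≤ ic.2 ∧ ic.2 ≤ '9') then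
      n2 ++ [PySem.Chars.upperChar ic.2]
    else n2 ++ ['_']) [])

-- ===== PORT B =====
-- pass 1 of Source B: every character outside [A-Za-z0-9] becomes '_'
def dnPass1 (c : Char) : Char :=
  if ¬ (('A' ≤ c ∧ c ≤ 'Z') ∨ ('a' ≤ c ∧ c ≤ 'z') ∨ ('0' ≤ c ∧ c ≤ '9')) then '_' else c

def define_name_alt (n : String) : String :=
  let s1 := n.toList.map dnPass1
  -- pass 2: '_' before every non-initial uppercase letter
  let s2 := (PySem.List.enumerate s1).map (fun ic =>
    if ic.1 > 0 ∧ 'A' ≤ ic.2 ∧ ic.2 ≤ 'Z' then ['_', ic.2] else [ic.2])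
  -- pass 3: join and uppercase the whole string
  String.ofList (s2.flatten.map PySem.Chars.upperChar)

-- ===== PRECONDITION & SPEC =====
def Spec_define_name (n : String) (out : String) : Prop := out = define_name_alt n
instance (n : String) (out : String) : Decidable (Spec_define_name n out) := by unfold Spec_define_name; infer_instance

-- ===== CLAIM (what is proved, stated in full; the proofs are below) =====
def Claim_equal_define_name : Prop := ∀ (n : String), Dom_define_name n → Spec_define_name n (define_name n)

-- ===== LEMMAS AND PROOFS =====

-- A's per-character contribution
def dnPieceA (ic : Int × Char) : List Char :=
  if 'A' ≤ ic.2 ∧ ic.2 ≤ 'Z' then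
    if ic.1 > 0 then ['_', ic.2] else [ic.2]
  else if ('a' ≤ ic.2 ∧ ic.2 ≤ 'z') ∨ ('0' ≤ ic.2 ∧ ic.2 ≤ '9') then
    [PySem.Chars.upperChar ic.2]
  else ['_']

theorem dn_a_eq_flatMap (n : String) :
    define_name n = String.ofList ((PySem.List.enumerate n.toList).flatMap dnPieceA) := by
  unfold define_name
  have h : (fun (n2 : List Char) (ic : Int × Char) =>
      if 'A' ≤ ic.2 ∧ ic.2 ≤ 'Z' then
        if ic.1 > 0 then (n2 ++ ['_']) ++ [ic.2] else n2 ++ [ic.2]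
      else if ('a' ≤ ic.2 ∧ ic.2 ≤ 'z') ∨ ('0' ≤ ic.2 ∧ ic.2 ≤ '9') then
        n2 ++ [PySem.Chars.upperChar ic.2]
      else n2 ++ ['_'])
      = (fun n2 ic => n2 ++ dnPieceA ic) := by
    funext n2 ic
    unfold dnPieceA
    split_ifs <;> simp
  rw [h, PySem.List.foldl_append_eq_flatMap, List.nil_append]

theorem dn_enumerate_map {α β : Type} (f : α → β) (l : List α) (s : Int) :
    PySem.List.enumerate (l.map f) s
      = (PySem.List.enumerate l s).map (fun ic => (ic.1, f ic.2)) := by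
  induction l generalizing s with
  | nil => simp [PySem.List.enumerate]
  | cons x xs ih => simp [PySem.List.enumerate_cons, ih]

theorem dn_pointwise (ic : Int × Char) :
    dnPieceA ic
      = (if ic.1 > 0 ∧ 'A' ≤ dnPass1 ic.2 ∧ dnPass1 ic.2 ≤ 'Z'
         then ['_', dnPass1 ic.2] else [dnPass1 ic.2]).map PySem.Chars.upperChar := by
  obtain ⟨i, c⟩ := ic
  have hund : PySem.Chars.upperChar '_' = '_' := by decide
  unfold dnPieceA dnPass1
  by_cases hU : 'A' ≤ c ∧ c ≤ 'Z'
  · -- uppercase: kept by pass 1, fixed by upperChar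
    have hlow : PySem.Chars.islower c = false := by
      simp only [PySem.Chars.islower, Bool.and_eq_false_iff, decide_eq_false_iff_not]
      left
      intro h
      exact absurd (le_trans h hU.2) (by decide)
    have hup : PySem.Chars.upperChar c = c := by
      simp [PySem.Chars.upperChar, hlow]
    simp only [hU, if_pos, true_and]
    by_cases hi : i > 0 <;> simp [hU, hi, hup, hund]
  · by_cases hL : ('a' ≤ c ∧ c ≤ 'z') ∨ ('0' ≤ c ∧ c ≤ '9')
    · -- lowercase or digit: kept by pass 1, not uppercase
      simp [hU, hL]
    · -- everything else becomes '_', which is not uppercase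
      simp [hU, hL, show ¬ ('_' ≤ 'Z') by decide, hund]

-- ===== VERDICT (by name: the statement is the Claim_ definition above) =====
theorem define_name_spec : Claim_equal_define_name := by
  intro n _
  show define_name n = define_name_alt n
  rw [dn_a_eq_flatMap]
  unfold define_name_alt
  dsimp only
  rw [dn_enumerate_map, List.map_map, ← List.flatMap_def, List.map_flatMap,
      funext dn_pointwise]
  rfl
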